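-- pv_equiv track=rewrite | github.com/williampsmith/air-doodle | MatrixControl/PythonSerial/matrixAPI.py | attachCharacterMatricesToBitmapMatrix
-- ===== SOURCE A (Python) =====
-- def attachCharacterMatricesToBitmapMatrix(characterMatrices, maxCharWidth, totalWidth, maxCharHeight, totalHeight):
--     # Attaches varying size characters to the current bitmap matrix, appending the characters to existing characters
--     # and returns the bitmap matrix
--     offsetRow = (32 - totalHeight) // 2
--     offsetCol = (32 - totalWidth) // 2
--     totalRowOffset = offsetRow
--     totalColOffset = offsetCol
--
--     bitmapMatrix = [[0 for _ in range(32)] for _ in range(32)]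
--     for characterMatrix in characterMatrices:
--         charWidth = len(characterMatrix[0])
--         charHeight = len(characterMatrix)
--         # subtract 1 since character matrix starts at index totalRowOffset, not after
--         if (totalColOffset + charWidth - 1) > 31:
--             totalColOffset = offsetCol
--             totalRowOffset += maxCharHeight
--         if (totalRowOffset + charHeight - 1) > 31:
--             break
--         for row in range(charHeight):
--             for col in range(charWidth):
--                 bitmapMatrix[row+totalRowOffset][col+totalColOffset] = characterMatrix[row][col]
--
--         totalColOffset += charWidth
--
--     return bitmapMatrix
-- ===== SOURCE B (Python) =====
-- def attachCharacterMatricesToBitmapMatrix(characterMatrices, maxCharWidth, totalWidth, maxCharHeight, totalHeight):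
--     # Two-phase rewrite: a layout pass computes where each character goes,
--     # then a row-major render pass builds each of the 32 output rows directly.
--     offsetRow = (32 - totalHeight) // 2
--     offsetCol = (32 - totalWidth) // 2
--
--     placements = []
--     r, c = offsetRow, offsetCol
--     for cm in characterMatrices:
--         w = len(cm[0])
--         h = len(cm)
--         if c + w - 1 > 31:
--             c = offsetCol
--             r += maxCharHeight
--         if r + h - 1 > 31:
--             break
--         placements.append((r, c, cm))
--         c += w
--
--     bitmap = []
--     for i in range(32):
--         row = [0] * 32
--         for (pr, pc, cm) in placements:
--             if pr <= i < pr + len(cm):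
--                 w = len(cm[0])
--                 row[pc:pc + w] = cm[i - pr][:w]
--         bitmap.append(row)
--     return bitmap
-- ===== Notes on version B (the rewrite author's own statement) =====
-- stated objective: alternative
-- what changed: Splits A's single fused pass (mutating cell-by-cell into a preallocated 32x32 matrix) into a layout pass that computes a placement list and a row-major render pass that builds each of the 32 output rows directly by slice-copying the character rows that intersect it.
import Mathlib
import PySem

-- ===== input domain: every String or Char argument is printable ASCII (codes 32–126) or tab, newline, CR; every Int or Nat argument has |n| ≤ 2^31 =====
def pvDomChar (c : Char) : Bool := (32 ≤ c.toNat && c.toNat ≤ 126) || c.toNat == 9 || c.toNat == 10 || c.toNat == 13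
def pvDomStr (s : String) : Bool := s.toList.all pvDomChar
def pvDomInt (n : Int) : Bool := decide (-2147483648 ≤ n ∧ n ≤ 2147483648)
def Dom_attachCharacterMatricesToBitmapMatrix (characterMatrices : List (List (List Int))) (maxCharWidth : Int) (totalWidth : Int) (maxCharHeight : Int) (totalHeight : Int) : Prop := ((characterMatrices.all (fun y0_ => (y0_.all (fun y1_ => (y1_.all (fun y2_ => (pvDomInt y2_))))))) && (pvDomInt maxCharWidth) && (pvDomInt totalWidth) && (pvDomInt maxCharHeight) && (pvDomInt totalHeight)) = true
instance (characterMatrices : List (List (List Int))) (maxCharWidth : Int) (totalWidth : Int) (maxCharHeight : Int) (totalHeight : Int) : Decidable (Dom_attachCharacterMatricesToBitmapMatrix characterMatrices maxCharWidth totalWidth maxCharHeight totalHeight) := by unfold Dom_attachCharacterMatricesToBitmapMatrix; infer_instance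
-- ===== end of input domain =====

-- B replaces A's single fused mutate-in-place pass with a layout pass producing a placement
-- list followed by a row-major render pass that builds each of the 32 output rows directly
-- (objective: alternative decomposition, same cost).

-- ===== PORT A =====

-- bitmapMatrix[i][j] = v  (Python index assignment; negative index from the end; where Python
-- would raise IndexError — excluded by Pre_ — this total form is a no-op)
def pvSetCell (bm : List (List Int)) (i j : Int) (v : Int) : List (List Int) :=
  PySem.List.pySetD bm i (PySem.List.pySetD (PySem.List.pyGetD bm i ([] : List Int)) j v)

-- the nested 'for row in range(charHeight): for col in range(charWidth): …' block of A
def pvPlaceChar (bm : List (List Int)) (tr tc : Int) (cm : List (List Int)) : List (List Int) :=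
  let w : Nat := (PySem.List.pyGetD cm 0 ([] : List Int)).length
  let h : Nat := cm.length
  (List.range h).foldl (fun bm (row : Nat) =>
    (List.range w).foldl (fun bm (col : Nat) =>
      pvSetCell bm ((row : Int) + tr) ((col : Int) + tc)
        (PySem.List.pyGetD (PySem.List.pyGetD cm (row : Int) ([] : List Int)) (col : Int) 0)) bm) bm

-- A's main 'for characterMatrix in characterMatrices' loop (break = stop recursing)
def pvLoopA (oc mch : Int) : List (List (List Int)) → List (List Int) → Int → Int → List (List Int)
  | [], bm, _, _ => bm
  | cm :: rest, bm, r, c =>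
    let w : Int := ((PySem.List.pyGetD cm 0 ([] : List Int)).length : Int)
    let h : Int := (cm.length : Int)
    let c1 : Int := if c + w - 1 > 31 then oc else c
    let r1 : Int := if c + w - 1 > 31 then r + mch else r
    if r1 + h - 1 > 31 then bm
    else pvLoopA oc mch rest (pvPlaceChar bm r1 c1 cm) r1 (c1 + w)

def attachCharacterMatricesToBitmapMatrix (characterMatrices : List (List (List Int))) (maxCharWidth : Int) (totalWidth : Int) (maxCharHeight : Int) (totalHeight : Int) : List (List Int) :=
  let offsetRow : Int := PySem.Int.floordiv (32 - totalHeight) 2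
  let offsetCol : Int := PySem.Int.floordiv (32 - totalWidth) 2
  let bitmapMatrix : List (List Int) := (List.range 32).map (fun _ => (List.range 32).map (fun _ => (0 : Int)))
  pvLoopA offsetCol maxCharHeight characterMatrices bitmapMatrix offsetRow offsetCol

-- ===== PORT B =====

-- B's layout pass: same wrap/break control flow, but only records (r, c, cm) placements
def pvLayout (oc mch : Int) : List (List (List Int)) → Int → Int → List (Int × Int × List (List Int))
  | [], _, _ => []
  | cm :: rest, r, c =>
    let w : Int := ((PySem.List.pyGetD cm 0 ([] : List Int)).length : Int)
    let h : Int := (cm.length : Int)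
    let c1 : Int := if c + w - 1 > 31 then oc else c
    let r1 : Int := if c + w - 1 > 31 then r + mch else r
    if r1 + h - 1 > 31 then []
    else (r1, c1, cm) :: pvLayout oc mch rest r1 (c1 + w)

-- Python slice assignment row[a:b] = seg (clamped bounds, b not left of a)
def pvSetSlice (row : List Int) (a b : Int) (seg : List Int) : List Int :=
  let n : Int := (row.length : Int)
  let a' : Int := min (max (if a < 0 then a + n else a) 0) n
  let b' : Int := max (min (max (if b < 0 then b + n else b) 0) n) a'
  row.take a'.toNat ++ seg ++ row.drop b'.toNat

-- body of B's render loop over placements: copy the character's slice into this output row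
def pvRowOp (i : Int) (row : List Int) (p : Int × Int × List (List Int)) : List Int :=
  if p.1 ≤ i ∧ i < p.1 + (p.2.2.length : Int) then
    let w : Int := ((PySem.List.pyGetD p.2.2 0 ([] : List Int)).length : Int)
    pvSetSlice row p.2.1 (p.2.1 + w)
      (PySem.List.slice (PySem.List.pyGetD p.2.2 (i - p.1) ([] : List Int)) none (some w))
  else row

-- B's render of output row i: start from [0]*32 and overlay every intersecting placement
def pvRenderRow (placements : List (Int × Int × List (List Int))) (i : Int) : List Int :=
  placements.foldl (pvRowOp i) (List.replicate 32 (0 : Int))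

def attachCharacterMatricesToBitmapMatrix_alt (characterMatrices : List (List (List Int))) (maxCharWidth : Int) (totalWidth : Int) (maxCharHeight : Int) (totalHeight : Int) : List (List Int) :=
  let offsetRow : Int := PySem.Int.floordiv (32 - totalHeight) 2
  let offsetCol : Int := PySem.Int.floordiv (32 - totalWidth) 2
  let placements := pvLayout offsetCol maxCharHeight characterMatrices offsetRow offsetCol
  (List.range 32).map (fun (i : Nat) => pvRenderRow placements (i : Int))

-- ===== PRECONDITION & SPEC =====
-- Pre_ restricts to the function's natural domain when characters are present: a nonnegative
-- line advance, text dimensions fitting the 32x32 display (otherwise A silently writes through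
-- Python negative-index wraparound), and well-formed character matrices (nonempty, rows at
-- least as long as the first row, first row fitting the centered line — otherwise A raises
-- IndexError).  See claim.json "cites" for excluded inputs on which A still returns.
def Pre_attachCharacterMatricesToBitmapMatrix (characterMatrices : List (List (List Int))) (maxCharWidth : Int) (totalWidth : Int) (maxCharHeight : Int) (totalHeight : Int) : Prop :=
  characterMatrices = [] ∨
  (characterMatrices ≠ [] ∧ characterMatrices.headI ≠ [] ∧
   (if PySem.Int.floordiv (32 - totalWidth) 2 + (characterMatrices.headI.headI.length : Int) - 1 > 31
    then PySem.Int.floordiv (32 - totalHeight) 2 + maxCharHeight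
    else PySem.Int.floordiv (32 - totalHeight) 2) + (characterMatrices.headI.length : Int) - 1 > 31) ∨
  (0 ≤ maxCharHeight ∧ totalHeight ≤ 32 ∧ totalWidth ≤ 32 ∧
   ∀ cm ∈ characterMatrices, cm ≠ [] ∧
     ((cm.headI.length : Int) ≤ 32 - PySem.Int.floordiv (32 - totalWidth) 2) ∧
     ∀ r ∈ cm, cm.headI.length ≤ r.length)
instance (characterMatrices : List (List (List Int))) (maxCharWidth : Int) (totalWidth : Int) (maxCharHeight : Int) (totalHeight : Int) : Decidable (Pre_attachCharacterMatricesToBitmapMatrix characterMatrices maxCharWidth totalWidth maxCharHeight totalHeight) := by unfold Pre_attachCharacterMatricesToBitmapMatrix; infer_instance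

def pvWitness_attachCharacterMatricesToBitmapMatrix : List (List (List Int)) × Int × Int × Int × Int := ([[[1]]], 5, 1, 1, 1)

def Spec_attachCharacterMatricesToBitmapMatrix (characterMatrices : List (List (List Int))) (maxCharWidth : Int) (totalWidth : Int) (maxCharHeight : Int) (totalHeight : Int) (out : List (List Int)) : Prop := out = attachCharacterMatricesToBitmapMatrix_alt characterMatrices maxCharWidth totalWidth maxCharHeight totalHeight
instance (characterMatrices : List (List (List Int))) (maxCharWidth : Int) (totalWidth : Int) (maxCharHeight : Int) (totalHeight : Int) (out : List (List Int)) : Decidable (Spec_attachCharacterMatricesToBitmapMatrix characterMatrices maxCharWidth totalWidth maxCharHeight totalHeight out) := by unfold Spec_attachCharacterMatricesToBitmapMatrix; infer_instance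

-- ===== CLAIM (what is proved, stated in full; the proofs are below) =====
def Claim_equal_attachCharacterMatricesToBitmapMatrix : Prop := ∀ (characterMatrices : List (List (List Int))) (maxCharWidth : Int) (totalWidth : Int) (maxCharHeight : Int) (totalHeight : Int), Dom_attachCharacterMatricesToBitmapMatrix characterMatrices maxCharWidth totalWidth maxCharHeight totalHeight → Pre_attachCharacterMatricesToBitmapMatrix characterMatrices maxCharWidth totalWidth maxCharHeight totalHeight → Spec_attachCharacterMatricesToBitmapMatrix characterMatrices maxCharWidth totalWidth maxCharHeight totalHeight (attachCharacterMatricesToBitmapMatrix characterMatrices maxCharWidth totalWidth maxCharHeight totalHeight)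

-- ===== LEMMAS AND PROOFS =====

-- 32x32 shape
def pvSh (bm : List (List Int)) : Prop := bm.length = 32 ∧ ∀ r ∈ bm, r.length = 32

-- a placement that fits the bitmap and has a well-formed character matrix
def pvPOk (p : Int × Int × List (List Int)) : Prop :=
  0 ≤ p.1 ∧ p.1 + (p.2.2.length : Int) ≤ 32 ∧ 0 ≤ p.2.1 ∧
  p.2.1 + ((PySem.List.pyGetD p.2.2 0 ([] : List Int)).length : Int) ≤ 32 ∧
  p.2.2 ≠ [] ∧ ∀ r ∈ p.2.2, (PySem.List.pyGetD p.2.2 0 ([] : List Int)).length ≤ r.length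

theorem pv_loopA_eq_layout (oc mch : Int) (cms : List (List (List Int))) :
    ∀ bm r c, pvLoopA oc mch cms bm r c =
      (pvLayout oc mch cms r c).foldl (fun bm p => pvPlaceChar bm p.1 p.2.1 p.2.2) bm := by
  induction cms with
  | nil => intro bm r c; simp [pvLoopA, pvLayout]
  | cons cm rest ih =>
    intro bm r c
    simp only [pvLoopA, pvLayout]
    split <;> split <;> simp [ih]

theorem pv_layout_ok (oc mch : Int) (hoc : 0 ≤ oc) (hmch : 0 ≤ mch)
    (cms : List (List (List Int)))
    (hcms : ∀ cm ∈ cms, cm ≠ [] ∧ ((cm.headI.length : Int) ≤ 32 - oc) ∧ ∀ r ∈ cm, cm.headI.length ≤ r.length) :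
    ∀ r c, 0 ≤ r → 0 ≤ c → ∀ p ∈ pvLayout oc mch cms r c, pvPOk p := by
  induction cms with
  | nil => intro r c _ _ p hp; simp [pvLayout] at hp
  | cons cm rest ih =>
    intro r c hr hc p hp
    obtain ⟨hne, hwid, hrows⟩ := hcms cm (by simp)
    have hhd : PySem.List.pyGetD cm 0 ([] : List Int) = cm.headI := by
      cases cm with
      | nil => simp at hne
      | cons a l => simp [PySem.List.pyGetD_zero_cons, List.headI]
    have key : ∀ r1 c1 : Int, 0 ≤ r1 → 0 ≤ c1 →
        c1 + ((PySem.List.pyGetD cm 0 ([] : List Int)).length : Int) ≤ 32 →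
        ¬ 31 < r1 + (cm.length : Int) - 1 →
        p ∈ ((r1, c1, cm) :: pvLayout oc mch rest r1 (c1 + ((PySem.List.pyGetD cm 0 ([] : List Int)).length : Int))) → pvPOk p := by
      intro r1 c1 h1 h2 h3 h4 hmem
      rcases List.mem_cons.mp hmem with h | h
      · subst h
        exact ⟨h1, by dsimp only; omega, h2, h3, hne, fun rr hrr => by rw [hhd]; exact hrows rr hrr⟩
      · exact ih (fun c hc => hcms c (by simp [hc])) _ _ h1 (by omega) p h
    simp only [pvLayout] at hp
    by_cases hw : c + ((PySem.List.pyGetD cm 0 ([] : List Int)).length : Int) - 1 > 31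
    · simp only [if_pos hw] at hp
      by_cases hb : r + mch + (cm.length : Int) - 1 > 31
      · rw [if_pos hb] at hp; simp at hp
      · rw [if_neg hb] at hp
        exact key _ _ (by omega) hoc (by rw [hhd]; omega) hb hp
    · simp only [if_neg hw] at hp
      by_cases hb : r + (cm.length : Int) - 1 > 31
      · rw [if_pos hb] at hp; simp at hp
      · rw [if_neg hb] at hp
        exact key _ _ hr hc (by omega) hb hp

theorem pv_inner_flat (pc : Int) (hpc : 0 ≤ pc) (vals : Nat → Int) :
    ∀ (w : Nat) (row : List Int), pc.toNat + w ≤ row.length →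
    (List.range w).foldl (fun r (col : Nat) => PySem.List.pySetD r ((col : Int) + pc) (vals col)) row
      = row.take pc.toNat ++ (List.range w).map vals ++ row.drop (pc.toNat + w) := by
  intro w
  induction w with
  | zero => intro row h; simp
  | succ w ih =>
    intro row h
    rw [List.range_succ, List.foldl_append, ih row (by omega)]
    simp only [List.foldl_cons, List.foldl_nil]
    rw [PySem.List.pySetD_of_nonneg _ (vals w) (show (0:Int) ≤ (w : Int) + pc by omega)]
    have hto : (((w : Int)) + pc).toNat = pc.toNat + w := by omega
    rw [hto]
    have hT : (row.take pc.toNat).length = pc.toNat := List.length_take_of_le (by omega)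
    have hM : ((List.range w).map vals).length = w := by simp
    have hD : row.drop (pc.toNat + w) = row[pc.toNat + w]'(by omega) :: row.drop (pc.toNat + w + 1) :=
      List.drop_eq_getElem_cons (by omega)
    rw [List.set_append, if_neg (by simp [hT, hM])]
    have hz : pc.toNat + w - (List.take pc.toNat row ++ List.map vals (List.range w)).length = 0 := by
      simp [hT, hM]
    rw [hz, hD, List.set_cons_zero, List.map_append]
    simp [List.append_assoc, Nat.add_assoc]

theorem pv_fold_setcell (i : Int) (h0 : 0 ≤ i) (pc : Int) (f : Nat → Int) :
    ∀ (w : Nat) (bm : List (List Int)), i.toNat < bm.length →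
    (List.range w).foldl (fun b (col : Nat) => pvSetCell b i ((col : Int) + pc) (f col)) bm
      = bm.set i.toNat ((List.range w).foldl (fun r (col : Nat) => PySem.List.pySetD r ((col : Int) + pc) (f col)) (bm.getD i.toNat [])) := by
  intro w
  induction w with
  | zero =>
    intro bm hlen
    rw [List.range_zero, List.foldl_nil, List.foldl_nil, List.getD_eq_getElem _ _ hlen,
      List.set_getElem_self]
  | succ w ih =>
    intro bm hlen
    rw [List.range_succ, List.foldl_append, List.foldl_append, ih bm hlen]
    simp only [List.foldl_cons, List.foldl_nil]
    unfold pvSetCell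
    rw [PySem.List.pySetD_of_nonneg _ _ h0, List.set_set,
      PySem.List.pyGetD_eq_getElem _ _ h0 (by simp only [List.length_set]; omega)]
    congr 1
    rw [List.getElem_set_self]

theorem pv_place_getD (bm : List (List Int)) (hsh : pvSh bm) (pr pc : Int)
    (cm : List (List Int)) (hp : pvPOk (pr, pc, cm)) :
    pvSh (pvPlaceChar bm pr pc cm) ∧
    ∀ i : Nat, i < 32 →
      (pvPlaceChar bm pr pc cm).getD i [] = pvRowOp (i : Int) (bm.getD i []) (pr, pc, cm) := by
  obtain ⟨hbm32, hrow32⟩ := hsh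
  obtain ⟨hpr0, hprh, hpc0, hpcw, hne, hrows⟩ := hp
  dsimp only at hpr0 hprh hpc0 hpcw hne hrows
  have hprt : ((pr.toNat : Int)) = pr := Int.toNat_of_nonneg hpr0
  have hgetrow : ∀ i : Nat, i < 32 → (bm.getD i []).length = 32 := by
    intro i hi
    have hi' : i < bm.length := by omega
    rw [List.getD_eq_getElem _ _ hi']
    exact hrow32 _ (List.getElem_mem hi')
  have hmaptake : ∀ (xs : List Int) (w : Nat), w ≤ xs.length →
      (List.range w).map (fun col => xs.getD col 0) = xs.take w := by
    intro xs w hxs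
    apply List.ext_getElem
    · simp [Nat.min_eq_left hxs]
    · intro n h1 h2
      simp only [List.getElem_map, List.getElem_range, List.getElem_take]
      rw [List.getD_eq_getElem]
  set wN := (PySem.List.pyGetD cm 0 ([] : List Int)).length with hwN
  set vals := fun (row col : Nat) => PySem.List.pyGetD (PySem.List.pyGetD cm (row : Int) ([] : List Int)) ((col : Int)) 0 with hvals
  set F := fun (b : List (List Int)) (row : Nat) =>
      (List.range wN).foldl (fun b (col : Nat) =>
        pvSetCell b ((row : Int) + pr) ((col : Int) + pc) (vals row col)) b with hF
  have aux : ∀ k : Nat, k ≤ cm.length →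
      pvSh ((List.range k).foldl F bm) ∧
      ∀ i : Nat, i < 32 → ((List.range k).foldl F bm).getD i [] =
        if pr ≤ (i : Int) ∧ (i : Int) < pr + (k : Int) then
          pvSetSlice (bm.getD i []) pc (pc + (wN : Int))
            (PySem.List.slice (PySem.List.pyGetD cm ((i : Int) - pr) ([] : List Int)) none (some (wN : Int)))
        else bm.getD i [] := by
    intro k
    induction k with
    | zero =>
      intro _
      refine ⟨⟨hbm32, hrow32⟩, ?_⟩
      intro i hi
      rw [List.range_zero, List.foldl_nil, if_neg (by push_cast; omega)]
    | succ k ih =>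
      intro hk1
      obtain ⟨⟨hA32, hArows⟩, hAget⟩ := ih (by omega)
      set A := (List.range k).foldl F bm with hA
      have hAgetrow : ∀ i : Nat, i < 32 → (A.getD i []).length = 32 := by
        intro i hi
        have hi' : i < A.length := by omega
        rw [List.getD_eq_getElem _ _ hi']
        exact hArows _ (List.getElem_mem hi')
      have hj0 : (0:Int) ≤ (k:Int) + pr := by omega
      have hjj : ((k:Int) + pr).toNat = k + pr.toNat := by omega
      have hj32 : k + pr.toNat < 32 := by omega
      -- the row this iteration writes was untouched so far
      have hAj : A.getD (k + pr.toNat) [] = bm.getD (k + pr.toNat) [] := by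
        rw [hAget _ hj32, if_neg (by push_cast; omega)]
      have hstep : (List.range (k+1)).foldl F bm
          = A.set (k + pr.toNat)
              ((bm.getD (k + pr.toNat) []).take pc.toNat
                ++ (List.range wN).map (vals k)
                ++ (bm.getD (k + pr.toNat) []).drop (pc.toNat + wN)) := by
        rw [List.range_succ, List.foldl_append, ← hA]
        simp only [List.foldl_cons, List.foldl_nil, hF]
        rw [pv_fold_setcell ((k:Int) + pr) hj0 pc (vals k) wN A (by omega), hjj, hAj]
        rw [pv_inner_flat pc hpc0 (vals k) wN (bm.getD (k + pr.toNat) []) (by rw [hgetrow _ hj32]; omega)]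
      have hnewlen : ((bm.getD (k + pr.toNat) []).take pc.toNat
                ++ (List.range wN).map (vals k)
                ++ (bm.getD (k + pr.toNat) []).drop (pc.toNat + wN)).length = 32 := by
        rw [List.length_append, List.length_append, List.length_take, List.length_map,
          List.length_range, List.length_drop, hgetrow _ hj32]
        omega
      constructor
      · rw [hstep]
        refine ⟨by simp [hA32], ?_⟩
        intro r hr
        rcases List.mem_or_eq_of_mem_set hr with h | h
        · exact hArows r h
        · rw [h]; exact hnewlen
      · intro i hi
        rw [hstep]
        by_cases hij : i = k + pr.toNat
        · subst hij
          rw [List.getD_eq_getElem _ _ (by simp [hA32]; omega), List.getElem_set_self]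
          rw [if_pos (by push_cast; omega)]
          have hik : ((k + pr.toNat : Nat) : Int) - pr = (k : Int) := by push_cast; omega
          rw [hik]
          -- identify the flat write with B's slice assignment
          have hcmk : PySem.List.pyGetD cm ((k : Int)) ([] : List Int) = cm.getD k [] := by
            simp [PySem.List.pyGetD_natCast]
          have hkmem : k < cm.length := by omega
          have hwle : wN ≤ (cm.getD k []).length := by
            rw [List.getD_eq_getElem _ _ hkmem]
            exact hrows _ (List.getElem_mem hkmem)
          have hseg : PySem.List.slice (cm.getD k []) none (some (wN : Int)) = (cm.getD k []).take wN :=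
            PySem.List.slice_to_natCast _ _
          have hvk : (List.range wN).map (vals k) = (cm.getD k []).take wN := by
            rw [← hmaptake _ _ hwle]
            apply List.map_congr_left
            intro col _
            simp [hvals, PySem.List.pyGetD_natCast]
          simp only [pvSetSlice, hcmk, hseg, hvk]
          rw [hgetrow _ hj32]
          push_cast
          rw [if_neg (by omega), if_neg (by omega)]
          have h1 : (min (max pc 0) (32:Int)).toNat = pc.toNat := by omega
          have h2 : (max (min (max (pc + (wN:Int)) 0) 32) (min (max pc 0) 32)).toNat = pc.toNat + wN := by omega
          rw [h1, h2]
        · rw [List.getD_eq_getElem?_getD, List.getElem?_set_ne (by omega), ← List.getD_eq_getElem?_getD]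
          rw [hAget _ hi]
          by_cases hband : pr ≤ (i : Int) ∧ (i : Int) < pr + (k : Int)
          · rw [if_pos hband, if_pos (by push_cast at hband ⊢; omega)]
          · rw [if_neg hband, if_neg (by push_cast at hband ⊢; omega)]
  obtain ⟨hsh', hget⟩ := aux cm.length le_rfl
  have hPC : pvPlaceChar bm pr pc cm = (List.range cm.length).foldl F bm := by
    rw [hF]; simp only [hvals, hwN]; rfl
  constructor
  · rw [hPC]; exact hsh'
  · intro i hi
    rw [hPC, hget i hi]
    simp only [pvRowOp, ← hwN]

theorem pv_fold_place_rows (P : List (Int × Int × List (List Int))) :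
    ∀ bm, pvSh bm → (∀ p ∈ P, pvPOk p) →
    P.foldl (fun bm p => pvPlaceChar bm p.1 p.2.1 p.2.2) bm
      = (List.range 32).map (fun (i : Nat) => P.foldl (pvRowOp (i : Int)) (bm.getD i [])) := by
  induction P with
  | nil =>
    intro bm hsh _
    obtain ⟨h32, _⟩ := hsh
    simp only [List.foldl_nil]
    apply List.ext_getElem
    · simp [h32]
    · intro n h1 h2
      simp only [List.getElem_map, List.getElem_range]
      rw [List.getD_eq_getElem _ _ (by simp at h2; omega)]
  | cons p P ih =>
    intro bm hsh hok
    have hp : pvPOk (p.1, p.2.1, p.2.2) := hok p (by simp)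
    obtain ⟨hsh', hget⟩ := pv_place_getD bm hsh p.1 p.2.1 p.2.2 hp
    rw [List.foldl_cons, ih _ hsh' (fun q hq => hok q (by simp [hq]))]
    apply List.map_congr_left
    intro i hi
    rw [List.foldl_cons, hget i (List.mem_range.mp hi)]

-- ===== VERDICT (by name: the statement is the Claim_ definition above) =====
theorem attachCharacterMatricesToBitmapMatrix_spec : Claim_equal_attachCharacterMatricesToBitmapMatrix := by
  intro cms mcw tw mch th _ hpre
  unfold Spec_attachCharacterMatricesToBitmapMatrix
  unfold attachCharacterMatricesToBitmapMatrix attachCharacterMatricesToBitmapMatrix_alt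
  rcases hpre with hnil | ⟨hne, hne0, hbrk⟩ | ⟨hmch, hth, htw, hcm⟩
  · subst hnil
    simp [pvLoopA, pvLayout, pvRenderRow, List.map_const']
  · rcases cms with _ | ⟨cm, rest⟩
    · exact absurd rfl hne
    · simp only [List.headI_cons] at hne0 hbrk
      have hhd : PySem.List.pyGetD cm 0 ([] : List Int) = cm.headI := by
        cases cm with
        | nil => exact absurd rfl hne0
        | cons a l => simp [PySem.List.pyGetD_zero_cons, List.headI]
      simp only [pvLoopA, pvLayout, hhd]
      split <;> rename_i h
      · rw [if_pos h] at hbrk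
        split <;> rename_i h2
        · simp [pvRenderRow, List.map_const']
        · exact absurd hbrk h2
      · rw [if_neg h] at hbrk
        split <;> rename_i h2
        · simp [pvRenderRow, List.map_const']
        · exact absurd hbrk h2
  · have hoc0 : 0 ≤ PySem.Int.floordiv (32 - tw) 2 := by
      rw [PySem.Int.floordiv_eq_ediv_of_pos (by norm_num)]
      exact Int.ediv_nonneg (by omega) (by norm_num)
    have hor0 : 0 ≤ PySem.Int.floordiv (32 - th) 2 := by
      rw [PySem.Int.floordiv_eq_ediv_of_pos (by norm_num)]
      exact Int.ediv_nonneg (by omega) (by norm_num)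
    have hsh0 : pvSh ((List.range 32).map (fun _ => (List.range 32).map (fun _ => (0 : Int)))) := by
      refine ⟨by simp, ?_⟩
      intro r hr
      simp only [List.mem_map] at hr
      obtain ⟨_, _, rfl⟩ := hr
      simp
    have hok := pv_layout_ok (PySem.Int.floordiv (32 - tw) 2) mch hoc0 hmch cms hcm
      (PySem.Int.floordiv (32 - th) 2) (PySem.Int.floordiv (32 - tw) 2) hor0 hoc0
    rw [pv_loopA_eq_layout, pv_fold_place_rows _ _ hsh0 hok]
    apply List.map_congr_left
    intro i hi
    have hz : ((List.range 32).map (fun _ => (List.range 32).map (fun _ => (0 : Int)))).getD i []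
        = List.replicate 32 (0 : Int) := by
      rw [List.getD_eq_getElem _ _ (by simpa using List.mem_range.mp hi)]
      simp only [List.map_const', List.length_range, List.getElem_replicate]
    rw [hz]
    rfl
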